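-- pv_equiv track=rewrite | github.com/YogeshUpdhyay/python-datastructures | arrays/spirallysorted.py | isSpirallySorted
-- ===== SOURCE A (Python) =====
-- def isSpirallySorted(arr, n):
--     start = 0
--     end = n-1
--     while start < end:
--         if arr[start] > arr[end]:
--             return False
--
--         start += 1
--
--         if arr[end] > arr[start]:
--             return False
--
--         end -= 1
--     return True
-- ===== SOURCE B (Python) =====
-- def isSpirallySorted(arr, n):
--     # Build the spiral value sequence by slicing: the first ceil(n/2) elements
--     # interleaved with the reversed back half, then compare with its sorted copy.
--     half = (n + 1) // 2
--     front = arr[:half]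
--     back = list(reversed(arr[half:n]))
--     spiral = []
--     for a, b in zip(front, back):
--         spiral += [a, b]
--     if len(front) > len(back):
--         spiral.append(front[-1])
--     return spiral == sorted(spiral)
-- ===== Notes on version B (the rewrite author's own statement) =====
-- stated objective: alternative
-- what changed: Instead of A's two-pointer comparison loop with early exit, B materialises the spiral value sequence by slicing (front half interleaved with the reversed back half) and decides the property by comparing that sequence with its sorted copy.
import Mathlib
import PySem

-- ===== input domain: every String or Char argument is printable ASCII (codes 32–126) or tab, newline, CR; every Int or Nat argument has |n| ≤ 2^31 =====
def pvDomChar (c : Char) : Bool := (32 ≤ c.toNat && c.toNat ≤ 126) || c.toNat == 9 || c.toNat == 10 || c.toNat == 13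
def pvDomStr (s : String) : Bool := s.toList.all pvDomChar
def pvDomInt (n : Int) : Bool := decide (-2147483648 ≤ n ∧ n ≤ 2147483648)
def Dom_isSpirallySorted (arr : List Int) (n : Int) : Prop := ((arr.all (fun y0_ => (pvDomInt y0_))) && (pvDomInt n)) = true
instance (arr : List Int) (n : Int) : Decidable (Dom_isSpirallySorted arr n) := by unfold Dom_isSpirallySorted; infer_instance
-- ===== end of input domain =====

-- B builds the spiral value sequence explicitly by slicing and interleaving and then
-- reduces the property to 'the sequence equals its sorted copy' (alternative algorithm;
-- no early exit, same result).

-- ===== PORT A =====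
-- the while loop of A: two pointers start/end moving inwards, two comparisons per step
def isSpLoop (arr : List Int) (s e : Int) : Bool :=
  if _h : s < e then
    if PySem.List.pyGetD arr s 0 > PySem.List.pyGetD arr e 0 then false
    else if PySem.List.pyGetD arr e 0 > PySem.List.pyGetD arr (s + 1) 0 then false
    else isSpLoop arr (s + 1) (e - 1)
  else true
termination_by (e - s).toNat
decreasing_by omega

def isSpirallySorted (arr : List Int) (n : Int) : Bool :=
  isSpLoop arr 0 (n - 1)

-- ===== PORT B =====
def isSpirallySorted_alt (arr : List Int) (n : Int) : Bool :=
  let half := PySem.Int.floordiv (n + 1) 2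
  let front := PySem.List.slice arr none (some half)
  let back := (PySem.List.slice arr (some half) (some n)).reverse
  let spiral0 := (front.zip back).foldl (fun acc p => acc ++ [p.1, p.2]) []
  let spiral := if front.length > back.length
                then spiral0 ++ [PySem.List.pyGetD front (-1) 0] else spiral0
  spiral == PySem.List.sorted spiral (fun x => x) false

-- ===== PRECONDITION & SPEC =====
-- Pre_ excludes exactly the inputs where Python A raises IndexError: n ≥ 2 with arr shorter than n.
def Pre_isSpirallySorted (arr : List Int) (n : Int) : Prop := n ≤ 1 ∨ n ≤ (arr.length : Int)
instance (arr : List Int) (n : Int) : Decidable (Pre_isSpirallySorted arr n) := by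
  unfold Pre_isSpirallySorted; infer_instance

def pvWitness_isSpirallySorted : List Int × Int := ([1, 5, 2, 4, 3], 5)

def Spec_isSpirallySorted (arr : List Int) (n : Int) (out : Bool) : Prop := out = isSpirallySorted_alt arr n
instance (arr : List Int) (n : Int) (out : Bool) : Decidable (Spec_isSpirallySorted arr n out) := by unfold Spec_isSpirallySorted; infer_instance

-- ===== CLAIM (what is proved, stated in full; the proofs are below) =====
def Claim_equal_isSpirallySorted : Prop := ∀ (arr : List Int) (n : Int), Dom_isSpirallySorted arr n → Pre_isSpirallySorted arr n → Spec_isSpirallySorted arr n (isSpirallySorted arr n)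

-- ===== LEMMAS AND PROOFS =====

-- element access shared by the characterisations of both sides
def aAt (arr : List Int) (i : Int) : Int := PySem.List.pyGetD arr i 0

-- the k-th index of the spiral order 0, n-1, 1, n-2, ...
def sIdx (n : Int) (k : ℕ) : Int :=
  if k % 2 = 0 then ((k / 2 : ℕ) : Int) else n - 1 - ((k / 2 : ℕ) : Int)

-- the k-th consecutive comparison of the spiral chain
def cp (arr : List Int) (n : Int) (k : ℕ) : Bool :=
  decide (aAt arr (sIdx n k) ≤ aAt arr (sIdx n (k + 1)))

-- the spiral value sequence
def spVals (arr : List Int) (n : Int) : List Int :=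
  (List.range' 0 n.toNat).map (fun k => aAt arr (sIdx n k))

theorem sIdx_even (n : Int) (t : ℕ) : sIdx n (2 * t) = (t : Int) := by
  unfold sIdx; rw [if_pos (by omega)]; omega

theorem sIdx_odd (n : Int) (t : ℕ) : sIdx n (2 * t + 1) = n - 1 - (t : Int) := by
  unfold sIdx; rw [if_neg (by omega)]
  have : (2 * t + 1) / 2 = t := by omega
  rw [this]

theorem not_gt_decide (X Y : Int) : (!decide (X > Y)) = decide (X ≤ Y) := by
  by_cases h : X > Y
  · rw [decide_eq_true h, decide_eq_false (by omega : ¬ X ≤ Y)]; rfl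
  · rw [decide_eq_false h, decide_eq_true (by omega : X ≤ Y)]; rfl

-- characterisation of A's loop at state (t, n-1-t): the remaining comparisons
theorem A_char (arr : List Int) (n : Int) :
    ∀ (d t : ℕ), n.toNat - 1 - 2 * t ≤ d →
      isSpLoop arr (t : Int) (n - 1 - (t : Int))
        = (List.range' (2 * t) (n.toNat - 1 - 2 * t)).all (cp arr n) := by
  intro d
  induction d with
  | zero =>
    intro t ht
    have hcnt : n.toNat - 1 - 2 * t = 0 := by omega
    rw [isSpLoop, dif_neg (by omega), hcnt]
    simp
  | succ d ih =>
    intro t ht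
    by_cases h : (t : Int) < n - 1 - (t : Int)
    · have hn : 2 * t + 1 < n.toNat := by omega
      rw [isSpLoop, dif_pos h]
      have hs' : (t : Int) + 1 = ((t + 1 : ℕ) : Int) := by push_cast; ring
      have he' : n - 1 - (t : Int) - 1 = n - 1 - ((t + 1 : ℕ) : Int) := by push_cast; ring
      have hrec : isSpLoop arr ((t : Int) + 1) (n - 1 - (t : Int) - 1)
          = (List.range' (2 * (t + 1)) (n.toNat - 1 - 2 * (t + 1))).all (cp arr n) := by
        rw [hs', he']; exact ih (t + 1) (by omega)
      have hc1 : (!decide (PySem.List.pyGetD arr (t : Int) 0 > PySem.List.pyGetD arr (n - 1 - (t : Int)) 0)) = cp arr n (2 * t) := by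
        unfold cp aAt
        rw [sIdx_even, sIdx_odd, not_gt_decide]
      have hc2 : (!decide (PySem.List.pyGetD arr (n - 1 - (t : Int)) 0 > PySem.List.pyGetD arr ((t : Int) + 1) 0)) = cp arr n (2 * t + 1) := by
        unfold cp aAt
        rw [sIdx_odd, show 2 * t + 1 + 1 = 2 * (t + 1) from by ring, sIdx_even, ← hs', not_gt_decide]
      by_cases hlast : n.toNat = 2 * t + 2
      · have hcnt : n.toNat - 1 - 2 * t = 1 := by omega
        have hself : n - 1 - (t : Int) = (t : Int) + 1 := by omega
        have hc2' : ¬ (PySem.List.pyGetD arr (n - 1 - (t : Int)) 0 > PySem.List.pyGetD arr ((t : Int) + 1) 0) := by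
          rw [hself]; exact lt_irrefl _
        rw [hcnt, List.range'_one, List.all_cons, List.all_nil, Bool.and_true, ← hc1]
        by_cases h1 : PySem.List.pyGetD arr (t : Int) 0 > PySem.List.pyGetD arr (n - 1 - (t : Int)) 0
        · rw [if_pos h1, decide_eq_true h1, Bool.not_true]
        · rw [if_neg h1, if_neg hc2', decide_eq_false h1, Bool.not_false]
          have h0 : n.toNat - 1 - 2 * (t + 1) = 0 := by omega
          rw [h0] at hrec
          rw [hrec, List.range'_zero, List.all_nil]
      · have hcnt : n.toNat - 1 - 2 * t = (n.toNat - 1 - 2 * (t + 1)) + 2 := by omega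
        rw [hcnt]
        have hsplit : List.range' (2 * t) ((n.toNat - 1 - 2 * (t + 1)) + 2)
            = 2 * t :: (2 * t + 1) :: List.range' (2 * (t + 1)) (n.toNat - 1 - 2 * (t + 1)) := by
          have h21 : 2 * t + 1 + 1 = 2 * (t + 1) := by ring
          rw [List.range'_succ, List.range'_succ, h21]
        rw [hsplit, List.all_cons, List.all_cons, ← hc1, ← hc2, ← hrec]
        by_cases h1 : PySem.List.pyGetD arr (t : Int) 0 > PySem.List.pyGetD arr (n - 1 - (t : Int)) 0
        · rw [if_pos h1, decide_eq_true h1, Bool.not_true, Bool.false_and]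
        · rw [if_neg h1, decide_eq_false h1, Bool.not_false, Bool.true_and]
          by_cases h2 : PySem.List.pyGetD arr (n - 1 - (t : Int)) 0 > PySem.List.pyGetD arr ((t : Int) + 1) 0
          · rw [if_pos h2, decide_eq_true h2, Bool.not_true, Bool.false_and]
          · rw [if_neg h2, decide_eq_false h2, Bool.not_false, Bool.true_and]
    · have hcnt : n.toNat - 1 - 2 * t = 0 := by omega
      rw [isSpLoop, dif_neg (by omega), hcnt]
      simp

-- floor division by 2 is Euclidean division by 2
theorem floordiv_two (x : Int) : PySem.Int.floordiv x 2 = x / 2 := by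
  simp [PySem.Int.floordiv, Int.fdiv_eq_ediv]

-- a Python slice with stop ≤ start (same clamping regime) is empty
theorem slice_nil_of_le {α : Type} (xs : List α) (a b : Int) (h : b ≤ a)
    (hs : 0 ≤ b ∨ a < 0) : PySem.List.slice xs (some a) (some b) = [] := by
  have hm : PySem.List.clampIdx xs.length b ≤ PySem.List.clampIdx xs.length a := by
    simp only [PySem.List.clampIdx]
    split_ifs <;> omega
  have hlen := PySem.List.length_slice xs a b
  have hz : (PySem.List.slice xs (some a) (some b)).length = 0 := by omega
  exact List.eq_nil_of_length_eq_zero hz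

-- a list of length ≤ 1 equals its sorted copy
theorem sorted_short (l : List Int) (h : l.length ≤ 1) :
    PySem.List.sorted l (fun x => x) false = l := by
  apply PySem.List.sorted_eq_self_of_pairwise
  match l, h with
  | [], _ => exact List.Pairwise.nil
  | [x], _ => exact List.pairwise_singleton _ _

-- beq on lists is decide of equality
theorem beq_lists (l s : List Int) : (l == s) = decide (l = s) := by
  by_cases h : l = s <;> simp [h]

-- l equals its own (stable) sorted copy iff l is a ≤-chain
theorem eq_sorted_iff_chain (l : List Int) :
    l = PySem.List.sorted l (fun x => x) false ↔ List.IsChain (α := Int) (· ≤ ·) l := by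
  constructor
  · intro h
    rw [List.isChain_iff_pairwise, h]
    exact PySem.List.sorted_pairwise l (fun x => x)
  · intro h
    rw [List.isChain_iff_pairwise] at h
    exact (PySem.List.sorted_eq_self_of_pairwise l (fun x => x) h).symm

-- a map over range' 0 (2c) is the flatMap of its index pairs
theorem map_range'_even {α : Type} (f : ℕ → α) :
    ∀ c : ℕ, (List.range' 0 (2 * c)).map f
      = (List.range' 0 c).flatMap (fun t => [f (2 * t), f (2 * t + 1)]) := by
  intro c
  induction c with
  | zero => simp
  | succ c ih =>
    rw [show 2 * (c + 1) = (2 * c + 1) + 1 from by ring, List.range'_concat,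
        show 2 * c + 1 = (2 * c) + 1 from rfl, List.range'_concat,
        List.range'_concat (s := 0) (n := c) (step := 1)]
    simp only [List.map_append, List.flatMap_append, ih, List.map_cons, List.map_nil,
      List.flatMap_cons, List.flatMap_nil, Nat.zero_add, Nat.one_mul, List.append_assoc]
    rfl

theorem map_range'_odd {α : Type} (f : ℕ → α) (c : ℕ) :
    (List.range' 0 (2 * c + 1)).map f
      = (List.range' 0 c).flatMap (fun t => [f (2 * t), f (2 * t + 1)]) ++ [f (2 * c)] := by
  rw [List.range'_concat, List.map_append, map_range'_even]
  simp

-- the zipped front/back pairs are the indexed spiral pairs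
theorem zip_front_back (arr : List Int) (n : Int) (h c : ℕ)
    (hlen : h + c ≤ arr.length) (hc : c ≤ h) (hn : n = ((h + c : ℕ) : Int)) :
    ((arr.take h).zip (((arr.drop h).take c).reverse))
      = (List.range' 0 c).map (fun (t : ℕ) => (aAt arr ((t : ℕ) : Int), aAt arr (n - 1 - ((t : ℕ) : Int)))) := by
  have hft : (arr.take h).length = h := by simp; omega
  have hbt : (((arr.drop h).take c).reverse).length = c := by simp; omega
  apply List.ext_getElem
  · simp [hft, hbt]; omega
  · intro t ht1 ht2
    have htc : t < c := by
      rw [List.length_zip, hft, hbt] at ht1; omega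
    rw [List.getElem_zip, List.getElem_map, List.getElem_range']
    have hg1 : (arr.take h)[t]'(by rw [hft]; omega) = arr[t]'(by omega) := List.getElem_take
    have hg2 : (((arr.drop h).take c).reverse)[t]'(by rw [hbt]; omega)
        = arr[h + (c - 1 - t)]'(by omega) := by
      rw [List.getElem_reverse]
      have hl : ((arr.drop h).take c).length = c := by simp; omega
      simp only [hl]
      rw [List.getElem_take, List.getElem_drop]
    rw [hg1, hg2]
    have ha1 : aAt arr (((0 + 1 * t : ℕ) : ℕ) : Int) = arr[t]'(by omega) := by
      unfold aAt
      rw [PySem.List.pyGetD_natCast, List.getD_eq_getElem arr 0 (by omega)]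
      congr 1; omega
    have ha2 : aAt arr (n - 1 - (((0 + 1 * t : ℕ) : ℕ) : Int)) = arr[h + (c - 1 - t)]'(by omega) := by
      unfold aAt
      have he : n - 1 - (((0 + 1 * t : ℕ) : ℕ) : Int) = ((h + (c - 1 - t) : ℕ) : Int) := by omega
      rw [he, PySem.List.pyGetD_natCast, List.getD_eq_getElem arr 0 (by omega)]
    rw [ha1, ha2]

-- l[-1] on a nonempty list
theorem pyGetD_neg_one (l : List Int) (hl : 0 < l.length) :
    PySem.List.pyGetD l (-1) 0 = l.getD (l.length - 1) 0 := by
  simp only [PySem.List.pyGetD, PySem.List.pyGet?, PySem.List.pyIdx?]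
  rw [if_neg (by omega), if_pos (by omega)]
  simp only [Option.bind_some, List.getD_eq_getElem?_getD]
  norm_num

-- B's built spiral list is the spiral value sequence (n = h + c, h = ceil(n/2))
theorem spiral_eq (arr : List Int) (n : Int) (h c : ℕ)
    (hc : c ≤ h) (hh1 : h ≤ c + 1)
    (hn : n = ((h + c : ℕ) : Int)) (hlen : h + c ≤ arr.length)
    (hhalf : PySem.Int.floordiv (n + 1) 2 = ((h : ℕ) : Int)) :
    isSpirallySorted_alt arr n
      = ((spVals arr n == PySem.List.sorted (spVals arr n) (fun x => x) false) : Bool) := by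
  have hfront : PySem.List.slice arr none (some (PySem.Int.floordiv (n + 1) 2)) = arr.take h := by
    rw [hhalf, PySem.List.slice_to arr (by positivity)]
    congr 1
  have hback : PySem.List.slice arr (some (PySem.Int.floordiv (n + 1) 2)) (some n)
      = (arr.drop h).take c := by
    rw [hhalf, PySem.List.slice_toNat arr (by positivity) (by omega)]
    congr 1
    omega
  simp only [isSpirallySorted_alt, hfront, hback]
  have hzip := zip_front_back arr n h c hlen hc hn
  have hflat : ((arr.take h).zip (((arr.drop h).take c).reverse)).foldl
      (fun acc p => acc ++ [p.1, p.2]) []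
      = (List.range' 0 c).flatMap
          (fun (t : ℕ) => [aAt arr ((t : ℕ) : Int), aAt arr (n - 1 - ((t : ℕ) : Int))]) := by
    rw [PySem.List.foldl_append_eq_flatMap (fun p : Int × Int => [p.1, p.2]), List.nil_append,
        hzip, List.flatMap_map]
  have hflen : (arr.take h).length = h := by simp; omega
  have hblen : (((arr.drop h).take c).reverse).length = c := by simp; omega
  have hnt : n.toNat = h + c := by omega
  have hpair : ∀ t : ℕ, t ∈ List.range' 0 c →
      [aAt arr (sIdx n (2 * t)), aAt arr (sIdx n (2 * t + 1))]
        = [aAt arr ((t : ℕ) : Int), aAt arr (n - 1 - ((t : ℕ) : Int))] := by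
    intro t _
    rw [sIdx_even, sIdx_odd]
  by_cases hodd : h = c + 1
  · -- odd length: one middle element is appended
    have hgt : (arr.take h).length > (((arr.drop h).take c).reverse).length := by
      rw [hflen, hblen]; omega
    rw [if_pos hgt, hflat]
    have hmid : PySem.List.pyGetD (arr.take h) (-1) 0 = aAt arr ((c : ℕ) : Int) := by
      rw [pyGetD_neg_one _ (by rw [hflen]; omega), hflen]
      unfold aAt
      rw [show h - 1 = c from by omega, PySem.List.pyGetD_natCast,
          List.getD_eq_getElem?_getD, List.getD_eq_getElem?_getD,
          List.getElem?_take_of_lt (by omega : c < h)]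
    have hv : spVals arr n = (List.range' 0 c).flatMap
          (fun (t : ℕ) => [aAt arr ((t : ℕ) : Int), aAt arr (n - 1 - ((t : ℕ) : Int))])
        ++ [aAt arr ((c : ℕ) : Int)] := by
      unfold spVals
      rw [hnt, show h + c = 2 * c + 1 from by omega,
          map_range'_odd (fun k => aAt arr (sIdx n k)) c]
      rw [List.flatMap_congr hpair, sIdx_even]
    rw [hv, hmid]
  · -- even length: nothing appended
    have heq : h = c := by omega
    have hgt : ¬ ((arr.take h).length > (((arr.drop h).take c).reverse).length) := by
      rw [hflen, hblen]; omega
    rw [if_neg hgt, hflat]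
    have hv : spVals arr n = (List.range' 0 c).flatMap
        (fun (t : ℕ) => [aAt arr ((t : ℕ) : Int), aAt arr (n - 1 - ((t : ℕ) : Int))]) := by
      unfold spVals
      rw [hnt, show h + c = 2 * c from by omega,
          map_range'_even (fun k => aAt arr (sIdx n k)) c]
      rw [List.flatMap_congr hpair]
    rw [hv]

-- the chain condition on the spiral sequence is the all-pass of consecutive comparisons
theorem chain_eq_all (arr : List Int) (n : Int) (hn : 1 ≤ n.toNat) :
    (decide (List.IsChain (α := Int) (· ≤ ·) (spVals arr n)))
      = (List.range' 0 (n.toNat - 1)).all (cp arr n) := by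
  rw [Bool.eq_iff_iff, decide_eq_true_iff, List.all_eq_true]
  unfold spVals
  rw [← List.range_eq_range', List.isChain_map,
      show n.toNat = (n.toNat - 1).succ from by omega, List.isChain_range_succ]
  constructor
  · intro hch k hk
    rw [← List.range_eq_range', List.mem_range] at hk
    exact decide_eq_true (hch k hk)
  · intro hall k hk
    have := hall k (by rw [← List.range_eq_range', List.mem_range]; omega)
    exact of_decide_eq_true this

-- characterisation of B on Pre_: the all-pass over the n-1 consecutive spiral comparisons
theorem B_char (arr : List Int) (n : Int) (hpre : Pre_isSpirallySorted arr n) :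
    isSpirallySorted_alt arr n = (List.range' 0 (n.toNat - 1)).all (cp arr n) := by
  have hres : ∀ l : List Int, l.length ≤ 1 →
      ((l == PySem.List.sorted l (fun x => x) false) : Bool) = true := by
    intro l hl
    rw [beq_lists, sorted_short l hl]
    simp
  by_cases hn : 2 ≤ n
  · have hlen : n ≤ (arr.length : Int) := by
      rcases hpre with h | h
      · omega
      · exact h
    have hhalf : PySem.Int.floordiv (n + 1) 2 = (((n.toNat + 1) / 2 : ℕ) : Int) := by
      rw [floordiv_two]; omega
    rw [spiral_eq arr n ((n.toNat + 1) / 2) (n.toNat - (n.toNat + 1) / 2)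
        (by omega) (by omega) (by omega) (by omega) (by rw [hhalf])]
    rw [beq_lists]
    rw [show (decide (spVals arr n = PySem.List.sorted (spVals arr n) (fun x => x) false))
        = decide (List.IsChain (α := Int) (· ≤ ·) (spVals arr n)) from by
      rw [Bool.eq_iff_iff, decide_eq_true_iff, decide_eq_true_iff]
      exact eq_sorted_iff_chain (spVals arr n)]
    exact chain_eq_all arr n (by omega)
  · -- n ≤ 1: the spiral list has at most one element, both sides are true
    have hrange : n.toNat - 1 = 0 := by omega
    rw [hrange]
    by_cases hm1 : n = -1
    · -- front is empty
      have hfront : PySem.List.slice arr none (some (PySem.Int.floordiv (n + 1) 2)) = [] := by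
        rw [hm1]
        norm_num [floordiv_two]
        rw [PySem.List.slice_to arr (by omega)]
        simp
      simp only [isSpirallySorted_alt, hfront, List.zip_nil_left, List.foldl_nil, List.length_nil,
        List.range'_zero, List.all_nil]
      rw [if_neg (by omega)]
      exact hres [] (by simp)
    · -- back is empty
      have hback : PySem.List.slice arr (some (PySem.Int.floordiv (n + 1) 2)) (some n) = [] := by
        apply slice_nil_of_le arr _ _ (by rw [floordiv_two]; omega)
        rw [floordiv_two]
        omega
      simp only [isSpirallySorted_alt, hback, List.reverse_nil, List.zip_nil_right,
        List.foldl_nil, List.length_nil, List.range'_zero, List.all_nil]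
      by_cases hf : (PySem.List.slice arr none (some (PySem.Int.floordiv (n + 1) 2))).length > 0
      · rw [if_pos hf]
        exact hres _ (by simp)
      · rw [if_neg hf]
        exact hres _ (by simp)

-- ===== VERDICT (by name: the statement is the Claim_ definition above) =====
theorem isSpirallySorted_spec : Claim_equal_isSpirallySorted := by
  intro arr n _ hpre
  unfold Spec_isSpirallySorted isSpirallySorted
  rw [B_char arr n hpre]
  have := A_char arr n (n.toNat - 1) 0 (by omega)
  simp only [Nat.cast_zero, sub_zero, Nat.mul_zero, Nat.sub_zero] at this
  exact this
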